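-- pv_equiv track=rewrite | github.com/Suvetha03/square-shift-coding | helperfunctions.py | fillWindowSeats
-- ===== SOURCE A (Python) =====
-- def fillWindowSeats(aeroplane_seating, passenger_id):
--     i=j=k=0
--     index = 0
--     for id in passenger_id:
--         try:
--             aeroplane_seating[i][j][k] = passenger_id[index]
--             index = index+1
--         except:
--             return aeroplane_seating, index
--         if i==0:
--             i=k=-1
--         elif i==-1:
--             i=k=0
--             j=j+1
--
--     return aeroplane_seating, index
-- ===== SOURCE B (Python) =====
-- def fillWindowSeats(aeroplane_seating, passenger_id):
--     rows = len(aeroplane_seating)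
--     n = len(passenger_id)
--     # Stage 1: how many ids find a seat before the first failure.
--     count = n
--     for idx in range(n):
--         r = 0 if idx % 2 == 0 else rows - 1
--         c = idx // 2
--         if rows == 0 or c >= len(aeroplane_seating[r]) or not aeroplane_seating[r][c]:
--             count = idx
--             break
--     # Stage 2: rebuild the seating, computing each seat's final occupant directly.
--     def occupant(r, c, k, old, cell_len):
--         if r == rows - 1 and k == cell_len - 1 and 2 * c + 1 < count:
--             return passenger_id[2 * c + 1]
--         if r == 0 and k == 0 and 2 * c < count:
--             return passenger_id[2 * c]
--         return old
--     result = [[[occupant(r, c, k, old, len(cell)) for k, old in enumerate(cell)]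
--                for c, cell in enumerate(row)]
--               for r, row in enumerate(aeroplane_seating)]
--     return result, count
-- ===== Notes on version B (the rewrite author's own statement) =====
-- stated objective: alternative
-- what changed: Replaced A's sequential state-machine of in-place writes guarded by try/except with a two-stage functional algorithm: first compute how many ids find a seat, then rebuild the seating with nested comprehensions that compute each seat's final occupant directly from its coordinates (no mutation, no exception handling).
import Mathlib
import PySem

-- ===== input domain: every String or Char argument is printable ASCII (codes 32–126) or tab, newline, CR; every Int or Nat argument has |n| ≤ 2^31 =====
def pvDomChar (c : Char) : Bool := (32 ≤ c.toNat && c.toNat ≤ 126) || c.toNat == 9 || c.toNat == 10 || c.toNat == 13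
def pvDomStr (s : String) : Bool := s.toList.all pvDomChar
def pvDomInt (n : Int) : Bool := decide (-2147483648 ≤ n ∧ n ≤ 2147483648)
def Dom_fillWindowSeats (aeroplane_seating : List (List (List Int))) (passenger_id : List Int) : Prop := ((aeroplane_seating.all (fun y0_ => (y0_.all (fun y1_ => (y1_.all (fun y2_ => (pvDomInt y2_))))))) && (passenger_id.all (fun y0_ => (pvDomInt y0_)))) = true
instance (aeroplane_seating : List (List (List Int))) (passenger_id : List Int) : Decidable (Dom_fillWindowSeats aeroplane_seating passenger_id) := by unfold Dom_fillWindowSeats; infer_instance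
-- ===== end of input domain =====

-- ===== PORT A =====
-- B rebuilds the seating functionally instead of mutating it in place like Python A does;
-- the equivalence proved here is about the RETURN value (which contains the same seating).

-- Python `s[i][j][k] = v` on nested lists: none = the IndexError caught by A's bare except.
def pvSet3 (s : List (List (List Int))) (i j k : Int) (v : Int) :
    Option (List (List (List Int))) := do
  let row ← PySem.List.pyGet? s i
  let cell ← PySem.List.pyGet? row j
  let cell' ← PySem.List.pySet? cell k v
  let row' ← PySem.List.pySet? row j cell'
  PySem.List.pySet? s i row'

-- A's for-loop over passenger_id carrying the mutable state i j k index
def pvFillA (passenger_id : List Int) (rest : List Int) (s : List (List (List Int)))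
    (i j k index : Int) : List (List (List Int)) × Int :=
  match rest with
  | [] => (s, index)
  | _ :: rest' =>
    match PySem.List.pyGet? passenger_id index with
    | none => (s, index)
    | some v =>
      match pvSet3 s i j k v with
      | none => (s, index)
      | some s' =>
        if i = 0 then pvFillA passenger_id rest' s' (-1) j (-1) (index + 1)
        else if i = -1 then pvFillA passenger_id rest' s' 0 (j + 1) 0 (index + 1)
        else pvFillA passenger_id rest' s' i j k (index + 1)

def fillWindowSeats (aeroplane_seating : List (List (List Int))) (passenger_id : List Int) : List (List (List Int)) × Int :=
  pvFillA passenger_id passenger_id aeroplane_seating 0 0 0 0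

-- ===== PORT B =====
-- Source B stage 1: does id number idx find its seat? (rows == 0 or c >= len(s[r]) or not s[r][c]);
-- the getD defaults are never read: the rows = 0 guard short-circuits exactly as in Python.
def pvFitB (s : List (List (List Int))) (idx : Nat) : Bool :=
  let rows := s.length
  let r := if idx % 2 = 0 then 0 else rows - 1
  let c := idx / 2
  !(rows = 0 || decide ((s.getD r []).length ≤ c) || (s.getD r []).getD c [] = [])

-- Source B stage 1: the first idx whose seat does not exist, else len(passenger_id)
def pvCountB (s : List (List (List Int))) (pid : List Int) (idx : Nat) : Nat :=
  if idx < pid.length then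
    if pvFitB s idx then pvCountB s pid (idx + 1) else idx
  else pid.length
termination_by pid.length - idx

-- Source B stage 2: the final occupant of seat (r, c, k), computed directly
def pvOccupant (rows : Int) (pid : List Int) (count : Int) (r c k old cellLen : Int) : Int :=
  if r = rows - 1 ∧ k = cellLen - 1 ∧ 2 * c + 1 < count then PySem.List.pyGetD pid (2 * c + 1) 0
  else if r = 0 ∧ k = 0 ∧ 2 * c < count then PySem.List.pyGetD pid (2 * c) 0
  else old

def fillWindowSeats_alt (aeroplane_seating : List (List (List Int))) (passenger_id : List Int) : List (List (List Int)) × Int :=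
  let rows : Int := aeroplane_seating.length
  let count : Nat := pvCountB aeroplane_seating passenger_id 0
  ((PySem.List.enumerate aeroplane_seating 0).map (fun rp =>
      (PySem.List.enumerate rp.2 0).map (fun cp =>
        (PySem.List.enumerate cp.2 0).map (fun kp =>
          pvOccupant rows passenger_id (count : Int) rp.1 cp.1 kp.1 kp.2 (cp.2.length : Int)))),
   (count : Int))

-- ===== PRECONDITION & SPEC =====
def Spec_fillWindowSeats (aeroplane_seating : List (List (List Int))) (passenger_id : List Int) (out : List (List (List Int)) × Int) : Prop := out = fillWindowSeats_alt aeroplane_seating passenger_id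
instance (aeroplane_seating : List (List (List Int))) (passenger_id : List Int) (out : List (List (List Int)) × Int) : Decidable (Spec_fillWindowSeats aeroplane_seating passenger_id out) := by unfold Spec_fillWindowSeats; infer_instance

-- ===== CLAIM (what is proved, stated in full; the proofs are below) =====
def Claim_equal_fillWindowSeats : Prop := ∀ (aeroplane_seating : List (List (List Int))) (passenger_id : List Int), Dom_fillWindowSeats aeroplane_seating passenger_id → Spec_fillWindowSeats aeroplane_seating passenger_id (fillWindowSeats aeroplane_seating passenger_id)

-- ===== LEMMAS AND PROOFS =====

-- seat access / shape helpers (proof-side only)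
def pvRow (s : List (List (List Int))) (r : Nat) : List (List Int) := s.getD r []
def pvCell (s : List (List (List Int))) (r c : Nat) : List Int := (pvRow s r).getD c []
def pvGet3 (s : List (List (List Int))) (r c k : Nat) : Int := (pvCell s r c).getD k 0
def pvShape (s : List (List (List Int))) : List (List Nat) := s.map (fun row => row.map List.length)
def pvCoordR (s0 : List (List (List Int))) (idx : Nat) : Nat := if idx % 2 = 0 then 0 else s0.length - 1
def pvCoordK (s0 : List (List (List Int))) (idx : Nat) : Nat :=
  if idx % 2 = 0 then 0 else (pvCell s0 (pvCoordR s0 idx) (idx / 2)).length - 1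
def pvWr (s : List (List (List Int))) (r c k : Nat) (v : Int) : List (List (List Int)) :=
  s.set r ((pvRow s r).set c ((pvCell s r c).set k v))

-- the common intermediate: A's loop in absolute coordinates
def pvG (s0 : List (List (List Int))) (pid : List Int) (s : List (List (List Int))) (idx : Nat) :
    List (List (List Int)) × Int :=
  if idx < pid.length then
    if pvFitB s0 idx then
      pvG s0 pid (pvWr s (pvCoordR s0 idx) (idx / 2) (pvCoordK s0 idx) (pid.getD idx 0)) (idx + 1)
    else (s, (idx : Int))
  else (s, (pid.length : Int))
termination_by pid.length - idx

-- Source B's rebuilt seating for an arbitrary count n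
def pvRB (s0 : List (List (List Int))) (pid : List Int) (n : Nat) : List (List (List Int)) :=
  (PySem.List.enumerate s0 0).map (fun rp =>
    (PySem.List.enumerate rp.2 0).map (fun cp =>
      (PySem.List.enumerate cp.2 0).map (fun kp =>
        pvOccupant (s0.length : Int) pid (n : Int) rp.1 cp.1 kp.1 kp.2 (cp.2.length : Int))))

theorem pvGetD_map_len3 (s : List (List (List Int))) (r : Nat) :
    (s.map (fun row => row.map List.length)).getD r [] = (s.getD r []).map List.length := by
  rcases Nat.lt_or_ge r s.length with h | h
  · simp [List.getD_eq_getElem?_getD, h]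
  · rw [List.getD_eq_getElem?_getD, List.getD_eq_getElem?_getD,
      List.getElem?_eq_none_iff.mpr (by simpa using h), List.getElem?_eq_none_iff.mpr h]; rfl

theorem pvGetD_map_len2 (row : List (List Int)) (c : Nat) :
    (row.map List.length).getD c 0 = (row.getD c []).length := by
  rcases Nat.lt_or_ge c row.length with h | h
  · simp [List.getD_eq_getElem?_getD, h]
  · rw [List.getD_eq_getElem?_getD, List.getD_eq_getElem?_getD,
      List.getElem?_eq_none_iff.mpr (by simpa using h), List.getElem?_eq_none_iff.mpr h]; rfl

theorem pvShape_len {s t : List (List (List Int))} (h : pvShape s = pvShape t) :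
    s.length = t.length := by
  have := congrArg List.length h; simpa [pvShape] using this

theorem pvShape_rowlen {s t : List (List (List Int))} (h : pvShape s = pvShape t) (r : Nat) :
    (pvRow s r).length = (pvRow t r).length := by
  have := congrArg (fun u => (u.getD r []).length) h
  simp only [pvShape, pvGetD_map_len3, List.length_map] at this
  simpa [pvRow] using this

theorem pvShape_celllen {s t : List (List (List Int))} (h : pvShape s = pvShape t) (r c : Nat) :
    (pvCell s r c).length = (pvCell t r c).length := by
  have := congrArg (fun u => (u.getD r []).getD c 0) h
  simp only [pvShape, pvGetD_map_len3, pvGetD_map_len2] at this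
  simpa [pvRow, pvCell] using this

theorem pvRow_of_lt {s : List (List (List Int))} {r : Nat} (h : r < s.length) :
    pvRow s r = s[r] := by
  simp [pvRow, List.getD_eq_getElem?_getD, List.getElem?_eq_getElem h]

theorem pvCell_of_lt {s : List (List (List Int))} {r c : Nat} (h1 : r < s.length)
    (h2 : c < s[r].length) : pvCell s r c = s[r][c] := by
  simp [pvCell, pvRow_of_lt h1, List.getD_eq_getElem?_getD, List.getElem?_eq_getElem h2]

theorem pvGet3_of_lt {s : List (List (List Int))} {r c k : Nat} (h1 : r < s.length)
    (h2 : c < s[r].length) (h3 : k < s[r][c].length) : pvGet3 s r c k = s[r][c][k] := by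
  simp [pvGet3, pvCell_of_lt h1 h2, List.getD_eq_getElem?_getD, List.getElem?_eq_getElem h3]

theorem pvExt3 {s t : List (List (List Int))} (hsh : pvShape s = pvShape t)
    (hval : ∀ r c k, pvGet3 s r c k = pvGet3 t r c k) : s = t := by
  apply List.ext_getElem (pvShape_len hsh)
  intro r hr hr'
  have hrl : s[r].length = t[r].length := by
    have := pvShape_rowlen hsh r
    rwa [pvRow_of_lt hr, pvRow_of_lt hr'] at this
  apply List.ext_getElem hrl
  intro c hc hc'
  have hcl : s[r][c].length = t[r][c].length := by
    have := pvShape_celllen hsh r c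
    rwa [pvCell_of_lt hr hc, pvCell_of_lt hr' hc'] at this
  apply List.ext_getElem hcl
  intro k hk hk'
  have := hval r c k
  rwa [pvGet3_of_lt hr hc hk, pvGet3_of_lt hr' hc' hk'] at this

theorem pvGet3_invalid {s : List (List (List Int))} {r c k : Nat}
    (h : ¬(r < s.length ∧ c < (pvRow s r).length ∧ k < (pvCell s r c).length)) :
    pvGet3 s r c k = 0 := by
  by_cases h3 : k < (pvCell s r c).length
  · have hr : r < s.length := by
      by_contra hcon
      have hrow : pvRow s r = [] := List.getD_eq_default _ _ (by omega)
      simp [pvCell, hrow] at h3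
    have hc : c < (pvRow s r).length := by
      by_contra hcon
      have hcell : pvCell s r c = [] := List.getD_eq_default _ _ (by omega)
      simp [hcell] at h3
    exact absurd ⟨hr, hc, h3⟩ h
  · exact List.getD_eq_default _ _ (by omega)

theorem pvEnum_getElem? {α : Type} (xs : List α) (st : Int) (i : Nat) :
    (PySem.List.enumerate xs st)[i]? = xs[i]?.map (fun v => (st + (i : Int), v)) := by
  induction xs generalizing st i with
  | nil => simp [PySem.List.enumerate_nil]
  | cons x xs ih =>
    rw [PySem.List.enumerate_cons]
    cases i with
    | zero => simp
    | succ j => simp [ih (st + 1) j]; ring_nf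

theorem pvEnum_getElem {α : Type} (xs : List α) (st : Int) (i : Nat) (h : i < xs.length) :
    (PySem.List.enumerate xs st)[i]'(by rw [PySem.List.length_enumerate]; exact h) =
      (st + (i : Int), xs[i]) := by
  have h2 : i < (PySem.List.enumerate xs st).length := by rw [PySem.List.length_enumerate]; exact h
  have e := pvEnum_getElem? xs st i
  rw [List.getElem?_eq_getElem h, List.getElem?_eq_getElem h2] at e
  simpa using e

theorem pvShape_pvRB (s0 : List (List (List Int))) (pid : List Int) (n : Nat) :
    pvShape (pvRB s0 pid n) = pvShape s0 := by
  apply List.ext_getElem (by simp [pvShape, pvRB, PySem.List.length_enumerate])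
  intro r hr1 hr2
  have hr : r < s0.length := by simpa [pvShape] using hr2
  simp only [pvShape, pvRB, List.getElem_map, pvEnum_getElem s0 0 r hr]
  apply List.ext_getElem (by simp [PySem.List.length_enumerate])
  intro c hc1 hc2
  have hc : c < s0[r].length := by simpa using hc2
  simp only [List.getElem_map, pvEnum_getElem s0[r] 0 c hc]
  simp [PySem.List.length_enumerate]

theorem pvGet3_pvRB (s0 : List (List (List Int))) (pid : List Int) (n : Nat)
    (r c k : Nat) (hr : r < s0.length) (hc : c < (pvRow s0 r).length) (hk : k < (pvCell s0 r c).length) :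
    pvGet3 (pvRB s0 pid n) r c k =
      pvOccupant (s0.length : Int) pid (n : Int) (r : Int) (c : Int) (k : Int)
        (pvGet3 s0 r c k) ((pvCell s0 r c).length : Int) := by
  have hc' : c < s0[r].length := by rwa [pvRow_of_lt hr] at hc
  have hk' : k < s0[r][c].length := by rwa [pvCell_of_lt hr hc'] at hk
  have hsh := pvShape_pvRB s0 pid n
  have hr2 : r < (pvRB s0 pid n).length := by rw [pvShape_len hsh]; exact hr
  have hc2 : c < (pvRB s0 pid n)[r].length := by
    have := pvShape_rowlen hsh r
    rw [pvRow_of_lt hr2, pvRow_of_lt hr] at this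
    omega
  have hk2 : k < (pvRB s0 pid n)[r][c].length := by
    have := pvShape_celllen hsh r c
    rw [pvCell_of_lt hr2 hc2, pvCell_of_lt hr hc'] at this
    omega
  rw [pvGet3_of_lt hr2 hc2 hk2, pvGet3_of_lt hr hc' hk', pvCell_of_lt hr hc']
  simp [pvRB, List.getElem_map, pvEnum_getElem s0 0 r hr, pvEnum_getElem s0[r] 0 c hc',
    pvEnum_getElem s0[r][c] 0 k hk']

theorem pvGetD_set {α : Type} (l : List α) (i j : Nat) (a d : α) :
    (l.set i a).getD j d = if j = i ∧ i < l.length then a else l.getD j d := by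
  by_cases hj : j < l.length
  · rw [List.getD_eq_getElem _ d (by simpa using hj), List.getD_eq_getElem _ d hj,
      List.getElem_set]
    by_cases hij : i = j
    · simp [hij, hj]
    · simp [hij]
      intro h
      exact absurd h.symm hij
  · rw [List.getD_eq_default _ _ (by simpa using hj), List.getD_eq_default _ _ (by omega)]
    have hcon : ¬(j = i ∧ i < l.length) := by omega
    simp [hcon]

theorem pvShape_pvWr (s : List (List (List Int))) (r c k : Nat) (v : Int) :
    pvShape (pvWr s r c k v) = pvShape s := by
  unfold pvWr
  rcases Nat.lt_or_ge r s.length with hr | hr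
  · rw [pvShape, List.map_set, pvRow_of_lt hr]
    have hrow : ((s[r].set c ((pvCell s r c).set k v)).map List.length) = s[r].map List.length := by
      rcases Nat.lt_or_ge c s[r].length with hc | hc
      · rw [pvCell_of_lt hr hc, List.map_set, List.length_set]
        have he : (s[r].map List.length)[c]'(by simpa using hc) = s[r][c].length := by simp
        rw [← he, List.set_getElem_self]
      · have hcell : pvCell s r c = [] := by
          rw [pvCell, pvRow_of_lt hr]
          exact List.getD_eq_default _ _ (by omega)
        rw [hcell]
        simp [List.set_eq_of_length_le (by simpa using hc)]
    rw [hrow]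
    have he : (s.map (fun row => row.map List.length))[r]'(by simpa using hr) = s[r].map List.length := by simp
    rw [← he, List.set_getElem_self, pvShape]
  · rw [List.set_eq_of_length_le (by simpa using hr)]

theorem pvGet3_pvWr (s : List (List (List Int))) (R C K : Nat) (v : Int)
    (hr : R < s.length) (hc : C < (pvRow s R).length) (hk : K < (pvCell s R C).length)
    (r c k : Nat) :
    pvGet3 (pvWr s R C K v) r c k =
      if r = R ∧ c = C ∧ k = K then v else pvGet3 s r c k := by
  have hc' : C < s[R].length := by rwa [pvRow_of_lt hr] at hc
  have hk' : K < s[R][C].length := by rwa [pvCell_of_lt hr hc'] at hk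
  unfold pvGet3 pvCell pvRow pvWr
  by_cases h1 : r = R
  · subst h1
    rw [pvGetD_set, if_pos ⟨rfl, hr⟩]
    by_cases h2 : c = C
    · subst h2
      rw [pvGetD_set (d := ([] : List Int)), if_pos ⟨rfl, hc⟩]
      by_cases h3 : k = K
      · subst h3
        rw [pvGetD_set, if_pos ⟨rfl, hk⟩]
        simp
      · rw [pvGetD_set, if_neg (by tauto), if_neg (by tauto)]
        rfl
    · rw [pvGetD_set (d := ([] : List Int)), if_neg (by tauto), if_neg (by tauto)]
      rfl
  · rw [pvGetD_set, if_neg (by tauto), if_neg (by tauto)]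

theorem pvRB_zero (s0 : List (List (List Int))) (pid : List Int) : pvRB s0 pid 0 = s0 := by
  apply pvExt3 (pvShape_pvRB s0 pid 0)
  intro r c k
  by_cases hv : r < s0.length ∧ c < (pvRow s0 r).length ∧ k < (pvCell s0 r c).length
  · obtain ⟨hr, hc, hk⟩ := hv
    rw [pvGet3_pvRB s0 pid 0 r c k hr hc hk]
    unfold pvOccupant
    rw [if_neg (by push_cast; omega), if_neg (by push_cast; omega)]
  · have hsh := pvShape_pvRB s0 pid 0
    have h1 := pvShape_len hsh
    have h2 := pvShape_rowlen hsh r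
    have h3 := pvShape_celllen hsh r c
    rw [pvGet3_invalid (by omega), pvGet3_invalid hv]

theorem pvFitB_iff (s : List (List (List Int))) (idx : Nat) :
    pvFitB s idx = true ↔
      (0 < s.length ∧ idx / 2 < (pvRow s (if idx % 2 = 0 then 0 else s.length - 1)).length ∧
        pvCell s (if idx % 2 = 0 then 0 else s.length - 1) (idx / 2) ≠ []) := by
  simp only [pvFitB, pvRow, pvCell, Bool.not_eq_eq_eq_not, Bool.not_true, Bool.or_eq_false_iff,
    decide_eq_false_iff_not, Nat.not_le]
  constructor
  · rintro ⟨⟨h1, h2⟩, h3⟩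
    exact ⟨by omega, h2, h3⟩
  · rintro ⟨h1, h2, h3⟩
    exact ⟨⟨by omega, h2⟩, h3⟩

theorem pvRB_succ (s0 : List (List (List Int))) (pid : List Int) (n : Nat)
    (_hn : n < pid.length) (hfit : pvFitB s0 n = true) :
    pvRB s0 pid (n + 1) =
      pvWr (pvRB s0 pid n) (pvCoordR s0 n) (n / 2) (pvCoordK s0 n) (pid.getD n 0) := by
  obtain ⟨hrows, hcidx, hcell⟩ := (pvFitB_iff s0 n).mp hfit
  have hRdef : pvCoordR s0 n = (if n % 2 = 0 then 0 else s0.length - 1) := rfl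
  have hR : pvCoordR s0 n < s0.length := by rw [hRdef]; split <;> omega
  have hC : n / 2 < (pvRow s0 (pvCoordR s0 n)).length := by rw [hRdef]; exact hcidx
  have hKlen : 0 < (pvCell s0 (pvCoordR s0 n) (n / 2)).length := by
    rw [hRdef]; exact List.length_pos_iff.mpr hcell
  have hK : pvCoordK s0 n < (pvCell s0 (pvCoordR s0 n) (n / 2)).length := by
    unfold pvCoordK; split <;> omega
  -- transfer the write coordinates' bounds to pvRB s0 pid n
  have hsh := pvShape_pvRB s0 pid n
  have hR' : pvCoordR s0 n < (pvRB s0 pid n).length := by rw [pvShape_len hsh]; exact hR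
  have hC' : n / 2 < (pvRB s0 pid n)[pvCoordR s0 n].length := by
    have := pvShape_rowlen hsh (pvCoordR s0 n)
    rw [pvRow_of_lt hR'] at this
    omega
  have hK' : pvCoordK s0 n < (pvRB s0 pid n)[pvCoordR s0 n][n / 2].length := by
    have := pvShape_celllen hsh (pvCoordR s0 n) (n / 2)
    rw [pvCell_of_lt hR' hC'] at this
    omega
  apply pvExt3
  · rw [pvShape_pvWr, pvShape_pvRB, pvShape_pvRB]
  intro r c k
  by_cases hv : r < s0.length ∧ c < (pvRow s0 r).length ∧ k < (pvCell s0 r c).length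
  · obtain ⟨hr, hc, hk⟩ := hv
    rw [pvGet3_pvRB s0 pid (n + 1) r c k hr hc hk,
      pvGet3_pvWr (pvRB s0 pid n) _ _ _ _ hR' (by rw [pvRow_of_lt hR']; exact hC')
        (by rw [pvCell_of_lt hR' hC']; exact hK') r c k]
    by_cases hpos : r = pvCoordR s0 n ∧ c = n / 2 ∧ k = pvCoordK s0 n
    · rw [if_pos hpos]
      obtain ⟨hr2, hc2, hk2⟩ := hpos
      subst hr2 hc2 hk2
      unfold pvOccupant
      by_cases hpar : n % 2 = 0
      · have hRv : pvCoordR s0 n = 0 := by rw [hRdef, if_pos hpar]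
        have hKv : pvCoordK s0 n = 0 := by unfold pvCoordK; rw [if_pos hpar]
        rw [hRv, hKv]
        rw [if_neg (by omega), if_pos ⟨by omega, by omega, by omega⟩]
        have hcast : 2 * ((n / 2 : Nat) : Int) = ((n : Nat) : Int) := by omega
        rw [hcast, PySem.List.pyGetD_natCast]
      · have hRv : pvCoordR s0 n = s0.length - 1 := by rw [hRdef, if_neg hpar]
        have hKv : pvCoordK s0 n = (pvCell s0 (s0.length - 1) (n / 2)).length - 1 := by
          unfold pvCoordK
          rw [if_neg hpar, hRv]
        rw [hRv] at hKlen
        rw [hRv, hKv]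
        rw [if_pos ⟨by omega, by omega, by omega⟩]
        have hcast : 2 * ((n / 2 : Nat) : Int) + 1 = ((n : Nat) : Int) := by omega
        rw [hcast, PySem.List.pyGetD_natCast]
    · rw [if_neg hpos, pvGet3_pvRB s0 pid n r c k hr hc hk]
      unfold pvOccupant
      by_cases hpar : n % 2 = 0
      · -- n even: the odd-writer condition cannot flip; the even one flips only at the write target
        have e1 : ((r : Int) = (s0.length : Int) - 1 ∧ (k : Int) = ((pvCell s0 r c).length : Int) - 1 ∧
            2 * (c : Int) + 1 < ((n + 1 : Nat) : Int)) ↔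
            ((r : Int) = (s0.length : Int) - 1 ∧ (k : Int) = ((pvCell s0 r c).length : Int) - 1 ∧
            2 * (c : Int) + 1 < ((n : Nat) : Int)) := by omega
        simp only [e1]
        by_cases h1 : ((r : Int) = (s0.length : Int) - 1 ∧ (k : Int) = ((pvCell s0 r c).length : Int) - 1 ∧
            2 * (c : Int) + 1 < ((n : Nat) : Int))
        · rw [if_pos h1, if_pos h1]
        · rw [if_neg h1, if_neg h1]
          by_cases h2 : ((r : Int) = 0 ∧ (k : Int) = 0 ∧ 2 * (c : Int) < ((n + 1 : Nat) : Int))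
          · by_cases h2' : ((r : Int) = 0 ∧ (k : Int) = 0 ∧ 2 * (c : Int) < ((n : Nat) : Int))
            · rw [if_pos h2, if_pos h2']
            · exfalso
              have hRv : pvCoordR s0 n = 0 := by rw [hRdef, if_pos hpar]
              have hKv : pvCoordK s0 n = 0 := by unfold pvCoordK; rw [if_pos hpar]
              exact hpos ⟨by omega, by omega, by omega⟩
          · rw [if_neg h2, if_neg (by omega)]
      · -- n odd: the even-writer condition cannot flip; the odd one flips only at the write target
        have e2 : ((r : Int) = 0 ∧ (k : Int) = 0 ∧ 2 * (c : Int) < ((n + 1 : Nat) : Int)) ↔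
            ((r : Int) = 0 ∧ (k : Int) = 0 ∧ 2 * (c : Int) < ((n : Nat) : Int)) := by omega
        by_cases h1' : ((r : Int) = (s0.length : Int) - 1 ∧ (k : Int) = ((pvCell s0 r c).length : Int) - 1 ∧
            2 * (c : Int) + 1 < ((n : Nat) : Int))
        · rw [if_pos (by omega : ((r : Int) = (s0.length : Int) - 1 ∧ (k : Int) = ((pvCell s0 r c).length : Int) - 1 ∧
            2 * (c : Int) + 1 < ((n + 1 : Nat) : Int))), if_pos h1']
        · by_cases h1 : ((r : Int) = (s0.length : Int) - 1 ∧ (k : Int) = ((pvCell s0 r c).length : Int) - 1 ∧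
              2 * (c : Int) + 1 < ((n + 1 : Nat) : Int))
          · exfalso
            have hc2 : c = n / 2 := by omega
            have hr2 : r = s0.length - 1 := by omega
            subst hc2 hr2
            have hRv : pvCoordR s0 n = s0.length - 1 := by rw [hRdef, if_neg hpar]
            have hKv : pvCoordK s0 n = (pvCell s0 (s0.length - 1) (n / 2)).length - 1 := by
              unfold pvCoordK
              rw [if_neg hpar, hRv]
            rw [hRv] at hKlen
            exact hpos ⟨by omega, rfl, by omega⟩
          · rw [if_neg h1, if_neg h1']
            simp only [e2]
  · have h1 := pvShape_len hsh
    have h2 := pvShape_rowlen hsh r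
    have h3 := pvShape_celllen hsh r c
    have hshW := pvShape_pvWr (pvRB s0 pid n) (pvCoordR s0 n) (n / 2) (pvCoordK s0 n) (pid.getD n 0)
    have hsh1 := (hshW.trans hsh)
    have h1' := pvShape_len hsh1
    have h2' := pvShape_rowlen hsh1 r
    have h3' := pvShape_celllen hsh1 r c
    have hsh2 := pvShape_pvRB s0 pid (n + 1)
    have g1 := pvShape_len hsh2
    have g2 := pvShape_rowlen hsh2 r
    have g3 := pvShape_celllen hsh2 r c
    rw [pvGet3_invalid (by omega), pvGet3_invalid (by omega)]

theorem pvSet3_even (s : List (List (List Int))) (c : Nat) (v : Int) :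
    pvSet3 s 0 (c : Int) 0 v =
      if 0 < s.length ∧ c < (pvRow s 0).length ∧ pvCell s 0 c ≠ [] then
        some (pvWr s 0 c 0 v) else none := by
  rcases s with _ | ⟨row0, srest⟩
  · simp [pvSet3, PySem.List.pyGet?, PySem.List.pyIdx?]
  · have hg0 : PySem.List.pyGet? (row0 :: srest) (0 : Int) = some row0 := by
      simp [pysem]
    simp only [pvSet3, hg0, Option.bind_eq_bind, Option.bind_some, PySem.List.pyGet?_natCast]
    by_cases hc : c < row0.length
    · rw [List.getElem?_eq_getElem hc]
      simp only [Option.bind_some]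
      by_cases hcell : row0[c] = []
      · have hnone : PySem.List.pySet? row0[c] (0 : Int) v = none := by
          rw [hcell]
          simp [PySem.List.pySet?, PySem.List.pyIdx?]
        rw [hnone, if_neg]
        · rfl
        · intro hcon
          apply hcon.2.2
          rw [pvCell, pvRow, List.getD_cons_zero, List.getD_eq_getElem _ _ hc, hcell]
      · have h1 : PySem.List.pySet? row0[c] (0 : Int) v = some (row0[c].set 0 v) := by
          have := PySem.List.pySet?_natCast row0[c] 0 v (by
            simpa using List.length_pos_iff.mpr hcell)
          simpa using this
        have h2 : PySem.List.pySet? row0 (c : Int) (row0[c].set 0 v) =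
            some (row0.set c (row0[c].set 0 v)) := PySem.List.pySet?_natCast _ _ _ hc
        have h3 : PySem.List.pySet? (row0 :: srest) (0 : Int) (row0.set c (row0[c].set 0 v)) =
            some ((row0 :: srest).set 0 (row0.set c (row0[c].set 0 v))) := by
          have := PySem.List.pySet?_natCast (row0 :: srest) 0 (row0.set c (row0[c].set 0 v))
            (by simp)
          simpa using this
        rw [h1]
        simp only [Option.bind_some]
        rw [h2]
        simp only [Option.bind_some]
        rw [h3, if_pos]
        · rw [pvWr, pvRow, pvCell, pvRow, List.getD_cons_zero, List.getD_eq_getElem _ _ hc]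
        · refine ⟨by simp, ?_, ?_⟩
          · rw [pvRow, List.getD_cons_zero]; exact hc
          · rw [pvCell, pvRow, List.getD_cons_zero, List.getD_eq_getElem _ _ hc]; exact hcell
    · rw [List.getElem?_eq_none (by omega)]
      simp only [Option.bind_none]
      rw [if_neg]
      intro hcon
      apply hc
      have := hcon.2.1
      rwa [pvRow, List.getD_cons_zero] at this

theorem pvPySet_neg_one {α : Type} (xs : List α) (v : α) (h : xs ≠ []) :
    PySem.List.pySet? xs (-1) v = some (xs.set (xs.length - 1) v) := by
  simp [PySem.List.pySet?, PySem.List.pyIdx?, h]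

theorem pvPyGet_neg_one {α : Type} (xs : List α) (h : xs ≠ []) :
    PySem.List.pyGet? xs (-1) = xs[xs.length - 1]? := by
  have hl : 0 < xs.length := List.length_pos_iff.mpr h
  have h1 : (1 : Int) ≤ (xs.length : Int) := by exact_mod_cast hl
  simp only [PySem.List.pyGet?, PySem.List.pyIdx?]
  norm_num [h1]

theorem pvSet3_odd (s : List (List (List Int))) (c : Nat) (v : Int) :
    pvSet3 s (-1) (c : Int) (-1) v =
      if 0 < s.length ∧ c < (pvRow s (s.length - 1)).length ∧ pvCell s (s.length - 1) c ≠ [] then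
        some (pvWr s (s.length - 1) c ((pvCell s (s.length - 1) c).length - 1) v) else none := by
  by_cases hs : s = []
  · subst hs
    simp [pvSet3, PySem.List.pyGet?, PySem.List.pyIdx?]
  · have hl : 0 < s.length := List.length_pos_iff.mpr hs
    have hg0 : PySem.List.pyGet? s (-1) = some s[s.length - 1] := by
      rw [pvPyGet_neg_one s hs, List.getElem?_eq_getElem (by omega)]
    have hrow : pvRow s (s.length - 1) = s[s.length - 1] := pvRow_of_lt (by omega)
    simp only [pvSet3, hg0, Option.bind_eq_bind, Option.bind_some, PySem.List.pyGet?_natCast]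
    by_cases hc : c < s[s.length - 1].length
    · rw [List.getElem?_eq_getElem hc]
      simp only [Option.bind_some]
      have hcelleq : pvCell s (s.length - 1) c = s[s.length - 1][c] := by
        rw [pvCell, hrow, List.getD_eq_getElem _ _ hc]
      by_cases hcell : s[s.length - 1][c] = []
      · have hnone : PySem.List.pySet? s[s.length - 1][c] (-1) v = none := by
          rw [hcell]
          simp [PySem.List.pySet?, PySem.List.pyIdx?]
        rw [hnone, if_neg]
        · rfl
        · intro hcon
          exact hcon.2.2 (hcelleq.trans hcell)
      · have hclen : 0 < s[s.length - 1][c].length := List.length_pos_iff.mpr hcell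
        rw [pvPySet_neg_one _ _ hcell]
        simp only [Option.bind_some]
        rw [PySem.List.pySet?_natCast _ _ _ hc]
        simp only [Option.bind_some]
        rw [pvPySet_neg_one _ _ hs, if_pos ⟨hl, by rwa [hrow], by rw [hcelleq]; exact hcell⟩]
        rw [pvWr, hrow, hcelleq]
    · rw [List.getElem?_eq_none (by omega)]
      simp only [Option.bind_none]
      rw [if_neg]
      intro hcon
      apply hc
      have h' := hcon.2.1
      rwa [hrow] at h' 

-- A's loop equals the absolute-coordinate loop (shape is the loop invariant)
theorem pvFillA_eq_pvG (s0 : List (List (List Int))) (pid : List Int) (idx : Nat) (s : List (List (List Int)))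
    (hle : idx ≤ pid.length) (hsh : pvShape s = pvShape s0) :
    pvFillA pid (pid.drop idx) s (if idx % 2 = 0 then 0 else -1) ((idx : Int) / 2)
      (if idx % 2 = 0 then 0 else -1) (idx : Int) = pvG s0 pid s idx := by
  have hlen := pvShape_len hsh
  have hrowlen := fun r => pvShape_rowlen hsh r
  have hcelllen := fun r c => pvShape_celllen hsh r c
  by_cases h : idx < pid.length
  · have hget : PySem.List.pyGet? pid (idx : Int) = some pid[idx] := by
      rw [PySem.List.pyGet?_natCast, List.getElem?_eq_getElem h]
    rw [List.drop_eq_getElem_cons h]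
    have hdiv : ((idx : Int)) / 2 = (((idx / 2 : Nat)) : Int) := by omega
    by_cases hpar : idx % 2 = 0
    · have hi : (if idx % 2 = 0 then (0 : Int) else -1) = 0 := if_pos hpar
      rw [hi]
      unfold pvFillA pvG
      rw [hget]
      simp only []
      rw [hdiv, pvSet3_even s (idx / 2) pid[idx]]
      have hcond : (0 < s.length ∧ idx / 2 < (pvRow s 0).length ∧ pvCell s 0 (idx / 2) ≠ []) ↔
          pvFitB s0 idx = true := by
        rw [pvFitB_iff, if_pos hpar]
        have h2 := hrowlen 0
        have h3 := hcelllen 0 (idx / 2)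
        constructor
        · rintro ⟨a, b, d⟩
          have d' := List.length_pos_iff.mpr d
          exact ⟨by omega, by omega, List.length_pos_iff.mp (by omega)⟩
        · rintro ⟨a, b, d⟩
          have d' := List.length_pos_iff.mpr d
          exact ⟨by omega, by omega, List.length_pos_iff.mp (by omega)⟩
      by_cases hfit : pvFitB s0 idx = true
      · rw [if_pos (hcond.mpr hfit), if_pos h, if_pos (by simpa using hfit)]
        simp only [reduceIte]
        have hcr : pvCoordR s0 idx = 0 := by rw [pvCoordR, if_pos hpar]
        have hck : pvCoordK s0 idx = 0 := by rw [pvCoordK, if_pos hpar]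
        have hval : pid.getD idx 0 = pid[idx] := List.getD_eq_getElem _ _ h
        rw [hcr, hck, hval]
        have hpar' : ¬((idx + 1) % 2 = 0) := by omega
        have hi' : (if (idx + 1) % 2 = 0 then (0 : Int) else -1) = -1 := if_neg hpar'
        have hdiv' : ((idx : Int)) / 2 = (((idx + 1 : Nat)) : Int) / 2 := by omega
        have hcast : ((idx : Int)) + 1 = (((idx + 1 : Nat)) : Int) := by omega
        rw [← hi', ← hdiv, hdiv', hcast]
        exact pvFillA_eq_pvG s0 pid (idx + 1) _ (by omega)
          ((pvShape_pvWr s 0 (idx / 2) 0 pid[idx]).trans hsh)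
      · rw [if_neg (fun hcon => hfit (hcond.mp hcon)), if_pos h,
          if_neg (by simpa using hfit)]
    · have hi : (if idx % 2 = 0 then (0 : Int) else -1) = -1 := if_neg hpar
      rw [hi]
      unfold pvFillA pvG
      rw [hget]
      simp only []
      rw [hdiv, pvSet3_odd s (idx / 2) pid[idx]]
      have h2 := hrowlen (s0.length - 1)
      have h3 := hcelllen (s0.length - 1) (idx / 2)
      have hsl : s.length - 1 = s0.length - 1 := by omega
      rw [hsl] at *
      have hcond : (0 < s.length ∧ idx / 2 < (pvRow s (s0.length - 1)).length ∧
          pvCell s (s0.length - 1) (idx / 2) ≠ []) ↔ pvFitB s0 idx = true := by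
        rw [pvFitB_iff, if_neg hpar]
        constructor
        · rintro ⟨a, b, d⟩
          have d' := List.length_pos_iff.mpr d
          exact ⟨by omega, by omega, List.length_pos_iff.mp (by omega)⟩
        · rintro ⟨a, b, d⟩
          have d' := List.length_pos_iff.mpr d
          exact ⟨by omega, by omega, List.length_pos_iff.mp (by omega)⟩
      by_cases hfit : pvFitB s0 idx = true
      · rw [if_pos (hcond.mpr hfit), if_pos h, if_pos (by simpa using hfit)]
        simp only [show ¬((-1 : Int) = 0) by omega, reduceIte]
        have hcr : pvCoordR s0 idx = s0.length - 1 := by rw [pvCoordR, if_neg hpar]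
        have hck : pvCoordK s0 idx = (pvCell s0 (s0.length - 1) (idx / 2)).length - 1 := by
          rw [pvCoordK, if_neg hpar, hcr]
        have hcelleq : (pvCell s (s0.length - 1) (idx / 2)).length =
            (pvCell s0 (s0.length - 1) (idx / 2)).length := h3
        have hval : pid.getD idx 0 = pid[idx] := List.getD_eq_getElem _ _ h
        rw [hcr, hck, hval, ← hcelleq]
        have hpar' : (idx + 1) % 2 = 0 := by omega
        have hi' : (if (idx + 1) % 2 = 0 then (0 : Int) else -1) = 0 := if_pos hpar'
        have hdiv' : ((idx : Int)) / 2 + 1 = (((idx + 1 : Nat)) : Int) / 2 := by omega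
        have hcast : ((idx : Int)) + 1 = (((idx + 1 : Nat)) : Int) := by omega
        rw [← hi', ← hdiv, hdiv', hcast]
        exact pvFillA_eq_pvG s0 pid (idx + 1) _ (by omega)
          ((pvShape_pvWr s (s0.length - 1) (idx / 2) _ pid[idx]).trans hsh)
      · rw [if_neg (fun hcon => hfit (hcond.mp hcon)), if_pos h,
          if_neg (by simpa using hfit)]
  · have hidx : idx = pid.length := by omega
    rw [List.drop_eq_nil_of_le (by omega)]
    unfold pvFillA pvG
    rw [if_neg h, hidx]
termination_by pid.length - idx

theorem pvG_eq_pvRB (s0 : List (List (List Int))) (pid : List Int) (idx : Nat)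
    (hle : idx ≤ pid.length) (hfit : ∀ m < idx, pvFitB s0 m = true) :
    pvG s0 pid (pvRB s0 pid idx) idx = (pvRB s0 pid (pvCountB s0 pid idx), (pvCountB s0 pid idx : Int)) := by
  by_cases h : idx < pid.length
  · by_cases hf : pvFitB s0 idx = true
    · rw [pvG]
      rw [if_pos h, if_pos (by simpa using hf)]
      rw [← pvRB_succ s0 pid idx h hf]
      rw [pvG_eq_pvRB s0 pid (idx + 1) (by omega)
        (fun m hm => by rcases Nat.lt_or_ge m idx with hm' | hm'
                        · exact hfit m hm'
                        · have : m = idx := by omega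
                          rwa [this])]
      have : pvCountB s0 pid idx = pvCountB s0 pid (idx + 1) := by
        rw [pvCountB, if_pos h, if_pos hf]
      rw [this]
    · rw [pvG, if_pos h, if_neg (by simpa using hf), pvCountB, if_pos h, if_neg hf]
  · have hidx : idx = pid.length := by omega
    rw [pvG, if_neg h, pvCountB, if_neg h, hidx]
termination_by pid.length - idx

-- ===== VERDICT (by name: the statement is the Claim_ definition above) =====
theorem fillWindowSeats_spec : Claim_equal_fillWindowSeats := by
  intro s0 pid _
  unfold Spec_fillWindowSeats fillWindowSeats fillWindowSeats_alt
  have h1 := pvFillA_eq_pvG s0 pid 0 s0 (by omega) rfl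
  have h2 := pvG_eq_pvRB s0 pid 0 (by omega) (by omega)
  rw [pvRB_zero] at h2
  simpa [pvRB] using h1.trans h2
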